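-- pv_equiv track=rewrite | github.com/cs-anonymous-researcher/ADVICE | src/utility/workload_spec.py | dsb_schema_constructor
-- ===== SOURCE A (Python) =====
-- from copy import deepcopy
--
-- dsb_foreign_mapping = {
--     "store_sales" : ("ss_cdemo_sk", "customer_demographics", "cd_demo_sk"),
--     "catalog_sales" : ("cs_bill_cdemo_sk", "customer_demographics", "cd_demo_sk"),
--     "catalog_returns" : ("cr_refunded_cdemo_sk", "customer_demographics", "cd_demo_sk"),
--     "web_sales" : ("ws_bill_cdemo_sk", "customer_demographics", "cd_demo_sk"),
--     "web_returns" : ("wr_refunded_cdemo_sk", "customer_demographics", "cd_demo_sk"),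
--     "store_returns": ("sr_cdemo_sk", "customer_demographics", "cd_demo_sk"),
--     "customer": ("c_current_cdemo_sk", "customer_demographics", "cd_demo_sk"),
-- }
--
-- def dsb_schema_constructor(schema_list, abbr_mapping):
--     """
--     {Description}
--
--     Args:
--         arg1:
--         arg2:
--     Returns:
--         return1:
--         return2:
--     """
--     schema_res = deepcopy(schema_list)
--
--     if len(schema_res) == 1:
--         # 单表情况下特判
--         return schema_res
--
--     for src_tbl, v in dsb_foreign_mapping.items():
--         src_col, ref_tbl, ref_col = v
--         if src_tbl in schema_list and ref_tbl not in schema_res:    # 保证只添加一次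
--             # 如果主键表不存在的话，直接添加
--             # schema_res.append(abbr_mapping[ref_tbl])
--             schema_res.append(ref_tbl)
--     return schema_res
-- ===== SOURCE B (Python) =====
-- dsb_foreign_mapping = {
--     "store_sales" : ("ss_cdemo_sk", "customer_demographics", "cd_demo_sk"),
--     "catalog_sales" : ("cs_bill_cdemo_sk", "customer_demographics", "cd_demo_sk"),
--     "catalog_returns" : ("cr_refunded_cdemo_sk", "customer_demographics", "cd_demo_sk"),
--     "web_sales" : ("ws_bill_cdemo_sk", "customer_demographics", "cd_demo_sk"),
--     "web_returns" : ("wr_refunded_cdemo_sk", "customer_demographics", "cd_demo_sk"),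
--     "store_returns": ("sr_cdemo_sk", "customer_demographics", "cd_demo_sk"),
--     "customer": ("c_current_cdemo_sk", "customer_demographics", "cd_demo_sk"),
-- }
--
-- def dsb_schema_constructor(schema_list, abbr_mapping):
--     # Every mapping entry references the same table, "customer_demographics",
--     # so instead of looping over the mapping we scan the INPUT list once,
--     # recursively, tracking whether a source table occurs (hit) and whether the
--     # demographics table is already present; the scan yields the (0- or
--     # 1-element) suffix to append.
--     if len(schema_list) == 1:
--         return list(schema_list)
--
--     def scan(rest, hit, present):
--         if not rest:
--             return ["customer_demographics"] if hit and not present else []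
--         t = rest[0]
--         return scan(rest[1:], hit or t in dsb_foreign_mapping,
--                     present or t == "customer_demographics")
--
--     return list(schema_list) + scan(schema_list, False, False)
-- ===== Notes on version B (the rewrite author's own statement) =====
-- stated objective: alternative
-- what changed: A loops over the 7-entry foreign-key mapping, testing each source table against schema_list and conditionally appending; B instead makes one recursive scan over the input schema_list with two boolean accumulators (a source table was seen / demographics already present) and appends the 0- or 1-element suffix that scan produces, exploiting that every mapping entry references the same table 'customer_demographics'.
import Mathlib
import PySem

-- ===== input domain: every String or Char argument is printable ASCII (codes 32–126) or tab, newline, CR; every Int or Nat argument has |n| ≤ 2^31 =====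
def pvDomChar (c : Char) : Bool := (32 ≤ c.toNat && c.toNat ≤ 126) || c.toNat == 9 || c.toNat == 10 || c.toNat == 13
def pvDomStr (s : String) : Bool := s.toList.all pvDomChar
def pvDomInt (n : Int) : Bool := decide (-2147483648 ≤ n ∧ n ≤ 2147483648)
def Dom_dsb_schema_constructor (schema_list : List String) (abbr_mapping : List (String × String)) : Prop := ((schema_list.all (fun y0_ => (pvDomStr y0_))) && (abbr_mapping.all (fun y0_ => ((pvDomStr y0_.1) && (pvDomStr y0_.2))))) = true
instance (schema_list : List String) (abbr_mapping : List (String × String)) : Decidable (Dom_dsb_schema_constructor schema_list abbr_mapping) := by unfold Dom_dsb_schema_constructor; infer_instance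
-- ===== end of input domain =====

-- B replaces A's loop over the 7-entry foreign-key mapping by one recursive scan of the
-- input schema_list with two boolean accumulators (alternative decomposition, same result).


-- ===== PORT A =====
-- dsb_foreign_mapping: module-level dict, ported as an association list in insertion order.
def pvDsbForeignMapping : List (String × String × String × String) :=
  [("store_sales", "ss_cdemo_sk", "customer_demographics", "cd_demo_sk"),
   ("catalog_sales", "cs_bill_cdemo_sk", "customer_demographics", "cd_demo_sk"),
   ("catalog_returns", "cr_refunded_cdemo_sk", "customer_demographics", "cd_demo_sk"),
   ("web_sales", "ws_bill_cdemo_sk", "customer_demographics", "cd_demo_sk"),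
   ("web_returns", "wr_refunded_cdemo_sk", "customer_demographics", "cd_demo_sk"),
   ("store_returns", "sr_cdemo_sk", "customer_demographics", "cd_demo_sk"),
   ("customer", "c_current_cdemo_sk", "customer_demographics", "cd_demo_sk")]

def dsb_schema_constructor (schema_list : List String) (abbr_mapping : List (String × String)) : List String :=
  let schema_res := schema_list      -- deepcopy of a list of (immutable) strings
  if schema_res.length = 1 then schema_res
  else
    pvDsbForeignMapping.foldl
      (fun res p =>
        if p.1 ∈ schema_list ∧ p.2.2.1 ∉ res then res ++ [p.2.2.1] else res)
      schema_res

-- ===== PORT B =====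
-- Source B's inner recursive `scan`: one pass over the remaining input with two flags.
def pvScan (rest : List String) (hit present : Bool) : List String :=
  match rest with
  | [] => if hit && !present then ["customer_demographics"] else []
  | t :: rs =>
      pvScan rs (hit || decide (t ∈ pvDsbForeignMapping.map Prod.fst))
                (present || t == "customer_demographics")

def dsb_schema_constructor_alt (schema_list : List String) (abbr_mapping : List (String × String)) : List String :=
  if schema_list.length = 1 then schema_list
  else schema_list ++ pvScan schema_list false false

-- ===== PRECONDITION & SPEC =====
def Spec_dsb_schema_constructor (schema_list : List String) (abbr_mapping : List (String × String)) (out : List String) : Prop := out = dsb_schema_constructor_alt schema_list abbr_mapping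
instance (schema_list : List String) (abbr_mapping : List (String × String)) (out : List String) : Decidable (Spec_dsb_schema_constructor schema_list abbr_mapping out) := by unfold Spec_dsb_schema_constructor; infer_instance

-- ===== CLAIM (what is proved, stated in full; the proofs are below) =====
def Claim_equal_dsb_schema_constructor : Prop := ∀ (schema_list : List String) (abbr_mapping : List (String × String)), Dom_dsb_schema_constructor schema_list abbr_mapping → Spec_dsb_schema_constructor schema_list abbr_mapping (dsb_schema_constructor schema_list abbr_mapping)

-- ===== LEMMAS AND PROOFS =====
-- A's loop only ever appends "customer_demographics": over any mapping list all of
-- whose ref-tables are that string, the fold is a single guarded append.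
lemma fold_guarded_append (m : List (String × String × String × String))
    (hall : ∀ p ∈ m, p.2.2.1 = "customer_demographics")
    (base : List String) (res : List String) :
    m.foldl (fun res p => if p.1 ∈ base ∧ p.2.2.1 ∉ res then res ++ [p.2.2.1] else res) res
      = if "customer_demographics" ∉ res ∧ m.any (fun p => decide (p.1 ∈ base))
        then res ++ ["customer_demographics"] else res := by
  induction m generalizing res with
  | nil => simp
  | cons p m ih =>
    have hp : p.2.2.1 = "customer_demographics" := hall p (List.mem_cons_self ..)
    have hall' : ∀ q ∈ m, q.2.2.1 = "customer_demographics" := fun q hq => hall q (List.mem_cons_of_mem _ hq)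
    simp only [List.foldl_cons, List.any_cons, hp]
    by_cases h1 : p.1 ∈ base
    · by_cases h2 : "customer_demographics" ∈ res
      · simp [h1, h2, ih hall' _]
      · simp [h1, h2, ih hall' _]
    · rw [if_neg (fun h => h1 h.1), ih hall' _]
      have hd : decide (p.1 ∈ base) = false := by simp [h1]
      simp only [hd, Bool.false_or]

-- Closed form of B's scan: its flags summarise what remains to be scanned.
lemma pvScan_closed (rest : List String) (hit present : Bool) :
    pvScan rest hit present
      = if (hit || rest.any (fun t => decide (t ∈ pvDsbForeignMapping.map Prod.fst)))
           && !(present || rest.contains "customer_demographics")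
        then ["customer_demographics"] else [] := by
  induction rest generalizing hit present with
  | nil => simp [pvScan]
  | cons t rs ih =>
    simp only [pvScan, ih, List.any_cons, List.contains_cons, Bool.beq_comm, Bool.or_assoc]

-- The existential "some mapping key occurs in the list" can be read from either side.
lemma any_comm (base : List String) :
    pvDsbForeignMapping.any (fun p => decide (p.1 ∈ base))
      = base.any (fun t => decide (t ∈ pvDsbForeignMapping.map Prod.fst)) := by
  rcases h : base.any (fun t => decide (t ∈ pvDsbForeignMapping.map Prod.fst)) with _ | _
  · simp only [List.any_eq_false] at h ⊢
    intro p hp hmem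
    exact absurd (by simpa using h p.1 (by simpa using hmem)) (by simpa using List.mem_map_of_mem (f := Prod.fst) hp)
  · simp only [List.any_eq_true] at h ⊢
    obtain ⟨t, ht, hk⟩ := h
    simp only [decide_eq_true_eq, List.mem_map] at hk
    obtain ⟨p, hp, hpt⟩ := hk
    exact ⟨p, hp, by simpa [hpt] using ht⟩

-- ===== VERDICT (by name: the statement is the Claim_ definition above) =====
theorem dsb_schema_constructor_spec : Claim_equal_dsb_schema_constructor := by
  intro schema_list abbr_mapping _
  unfold Spec_dsb_schema_constructor dsb_schema_constructor dsb_schema_constructor_alt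
  by_cases hl : schema_list.length = 1
  · simp [hl]
  · simp only [hl, if_false]
    rw [fold_guarded_append _ (by decide) schema_list schema_list,
        pvScan_closed, any_comm]
    by_cases h2 : "customer_demographics" ∈ schema_list
    · simp [h2]
    · simp only [h2, Bool.false_or, not_false_eq_true, true_and]
      split_ifs with ha hb hb <;> try simp_all
      obtain ⟨x, hx, a1, a2, a3, hm⟩ := hb
      exact ha x hx a1 a2 a3 hm
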